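-- pv_equiv track=rewrite | github.com/korlandril/for-cs101 | Program5TarsusArciga.py | file_to_clean_string
-- ===== SOURCE A (Python) =====
-- import string
--
-- def file_to_clean_string(file_to_clean, to_exclude):
--     """returns a text file in list form with all of the capitalization, punctuation, and excluded words to be
--     purged from it"""
--
--     punctuation = set(string.punctuation)
--     #puts all of that punctuation in one nice lil place to cross-reference with
--
--     new_text = ""
--     for line in file_to_clean:
--         if line != "\n":
--             new_text += line
--     #Get rid of all the blank lines
--
--     new_text = ''.join(ch for ch in new_text if ch not in punctuation).lower()
--     # Take out all the punctuation
--
--     clean_text_list = new_text.split()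
--     no_more_stop = [x for x in clean_text_list if x not in to_exclude] # bye-bye stop words
--     return no_more_stop
-- ===== SOURCE B (Python) =====
-- import string
--
-- def file_to_clean_string(file_to_clean, to_exclude):
--     """Single-pass state machine: scan characters once, skipping punctuation,
--     lowercasing, and emitting each completed non-stop word directly."""
--     punct = set(string.punctuation)
--     words = []
--     current = ""
--     for line in file_to_clean:
--         if line == "\n":
--             continue
--         for ch in line:
--             if ch in punct:
--                 continue
--             ch = ch.lower()
--             if ch.isspace():
--                 if current and current not in to_exclude:
--                     words.append(current)
--                 current = ""
--             else:
--                 current += ch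
--     if current and current not in to_exclude:
--         words.append(current)
--     return words
-- ===== Notes on version B (the rewrite author's own statement) =====
-- stated objective: alternative
-- what changed: Replaces the build-one-big-string / strip-punctuation / lower / split / list-comprehension pipeline (four passes over intermediate strings and lists) with a single character-level state-machine pass that accumulates the current word and emits each completed non-stop word directly.
import Mathlib
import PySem

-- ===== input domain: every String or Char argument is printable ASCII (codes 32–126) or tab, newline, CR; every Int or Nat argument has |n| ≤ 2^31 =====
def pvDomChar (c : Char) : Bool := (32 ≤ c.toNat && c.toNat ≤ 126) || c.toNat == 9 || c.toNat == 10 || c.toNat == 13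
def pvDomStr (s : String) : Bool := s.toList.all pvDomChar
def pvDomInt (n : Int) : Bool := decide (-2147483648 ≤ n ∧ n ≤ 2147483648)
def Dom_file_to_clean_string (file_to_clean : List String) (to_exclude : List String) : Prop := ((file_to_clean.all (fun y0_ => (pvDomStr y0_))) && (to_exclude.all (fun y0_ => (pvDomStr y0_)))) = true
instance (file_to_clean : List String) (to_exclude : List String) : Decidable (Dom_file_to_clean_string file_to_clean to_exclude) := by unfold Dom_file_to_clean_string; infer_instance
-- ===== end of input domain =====

-- B replaces A's concatenate/strip-punctuation/lower/split pipeline with a single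
-- character-level state-machine pass emitting completed non-stop words directly (alternative decomposition, same cost).

-- string.punctuation
def pvPunct : List Char := "!\"#$%&'()*+,-./:;<=>?@[\\]^_`{|}~".toList

-- ===== PORT A =====
def file_to_clean_string (file_to_clean : List String) (to_exclude : List String) : List String :=
  let punctuation := pvPunct
  -- new_text += line for non-"\n" lines
  let new_text := file_to_clean.foldl (fun acc line => if line ≠ "\n" then acc ++ line.toList else acc) ([] : List Char)
  -- ''.join(ch for ch in new_text if ch not in punctuation).lower()
  let cleaned := PySem.Chars.lower (new_text.filter (fun ch => decide (ch ∉ punctuation)))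
  let clean_text_list := PySem.Chars.split₀ cleaned
  -- words compared against to_exclude (as char lists on both sides)
  let excl := to_exclude.map String.toList
  let no_more_stop := clean_text_list.filter (fun x => decide (x ∉ excl))
  no_more_stop.map (fun x => String.ofList x)

-- ===== PORT B =====
-- flush the current word: append it unless empty or a stop word
def pvFlush (excl : List (List Char)) (res : List (List Char)) (w : List Char) : List (List Char) :=
  if w ≠ [] ∧ w ∉ excl then res ++ [w] else res

-- one character of B's state machine: skip punctuation, lower, flush on whitespace else extend
def pvStep (punct : List Char) (excl : List (List Char)) (st : List (List Char) × List Char) (ch : Char) : List (List Char) × List Char :=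
  if ch ∈ punct then st
  else
    let c := PySem.Chars.lowerChar ch
    if PySem.Chars.isspace c then (pvFlush excl st.1 st.2, [])
    else (st.1, st.2 ++ [c])

def file_to_clean_string_alt (file_to_clean : List String) (to_exclude : List String) : List String :=
  let punct := pvPunct
  let excl := to_exclude.map String.toList
  let st := file_to_clean.foldl
      (fun st line => if line = "\n" then st else line.toList.foldl (pvStep punct excl) st)
      (([], []) : List (List Char) × List Char)
  (pvFlush excl st.1 st.2).map (fun x => String.ofList x)

-- ===== PRECONDITION & SPEC =====
def Spec_file_to_clean_string (file_to_clean : List String) (to_exclude : List String) (out : List String) : Prop := out = file_to_clean_string_alt file_to_clean to_exclude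
instance (file_to_clean : List String) (to_exclude : List String) (out : List String) : Decidable (Spec_file_to_clean_string file_to_clean to_exclude out) := by unfold Spec_file_to_clean_string; infer_instance

-- ===== CLAIM (what is proved, stated in full; the proofs are below) =====
def Claim_equal_file_to_clean_string : Prop := ∀ (file_to_clean : List String) (to_exclude : List String), Dom_file_to_clean_string file_to_clean to_exclude → Spec_file_to_clean_string file_to_clean to_exclude (file_to_clean_string file_to_clean to_exclude)

-- ===== LEMMAS AND PROOFS =====

-- B's step on raw chars = the whitespace-only step on the punctuation-filtered, lowered chars
def pvStep2 (excl : List (List Char)) (st : List (List Char) × List Char) (c : Char) : List (List Char) × List Char :=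
  if PySem.Chars.isspace c then (pvFlush excl st.1 st.2, []) else (st.1, st.2 ++ [c])

theorem pv_step_eq_step2 (punct : List Char) (excl : List (List Char)) :
    ∀ (cs : List Char) (st : List (List Char) × List Char),
      cs.foldl (pvStep punct excl) st
        = (PySem.Chars.lower (cs.filter (fun ch => decide (ch ∉ punct)))).foldl (pvStep2 excl) st := by
  intro cs
  induction cs with
  | nil => intro st; simp [PySem.Chars.lower]
  | cons c rest ih =>
    intro st
    by_cases h : c ∈ punct
    · simp [List.foldl, pvStep, h, ih]
    · simp [List.foldl, pvStep, pvStep2, h, PySem.Chars.lower, ih]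

-- split₀.go's accumulator is a prefix
theorem pv_go_acc : ∀ (cs cur : List Char) (acc : List (List Char)),
    PySem.Chars.split₀.go cs cur acc = acc.reverse ++ PySem.Chars.split₀.go cs cur [] := by
  intro cs
  induction cs with
  | nil => intro cur acc; simp [PySem.Chars.split₀.go]; split <;> simp
  | cons c rest ih =>
    intro cur acc
    simp only [PySem.Chars.split₀.go]
    split
    · split
      · exact ih [] acc
      · rw [ih [] (cur.reverse :: acc), ih [] [cur.reverse]]; simp
    · exact ih (c :: cur) acc

-- main invariant: running pvStep2 then flushing = prefix ++ the filtered words of split₀.go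
theorem pv_main (excl : List (List Char)) :
    ∀ (cs : List Char) (res : List (List Char)) (w : List Char),
      (pvFlush excl (cs.foldl (pvStep2 excl) (res, w)).1 (cs.foldl (pvStep2 excl) (res, w)).2)
        = res ++ (PySem.Chars.split₀.go cs w.reverse []).filter (fun x => decide (x ∉ excl)) := by
  intro cs
  induction cs with
  | nil =>
    intro res w
    simp only [List.foldl, PySem.Chars.split₀.go]
    by_cases hw : w = []
    · simp [hw, pvFlush]
    · have : w.reverse.isEmpty = false := by simpa [List.isEmpty_iff] using hw
      simp [this, pvFlush, hw]
      split <;> simp_all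
  | cons c rest ih =>
    intro res w
    simp only [List.foldl, PySem.Chars.split₀.go, pvStep2]
    by_cases hs : PySem.Chars.isspace c
    · simp only [hs, if_true]
      rw [ih]
      by_cases hw : w = []
      · simp [hw, pvFlush]
      · have hne : w.reverse.isEmpty = false := by simpa [List.isEmpty_iff] using hw
        simp only [hne, Bool.false_eq_true, if_false, List.reverse_reverse, List.reverse_nil]
        rw [pv_go_acc rest [] [w]]
        by_cases hx : w ∈ excl
        · simp [pvFlush, hx]
        · simp [pvFlush, hx, hw]
    · simp only [hs, if_false, Bool.false_eq_true]
      rw [ih]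
      simp

-- the line loops of the two ports both reduce to the concatenation of non-"\n" lines
theorem pv_concatA (lines : List String) :
    ∀ (acc : List Char),
      lines.foldl (fun acc line => if line ≠ "\n" then acc ++ line.toList else acc) acc
        = acc ++ (lines.filter (fun l => decide (l ≠ "\n"))).flatMap String.toList := by
  induction lines with
  | nil => intro acc; simp
  | cons l rest ih =>
    intro acc
    by_cases h : l = "\n"
    · rw [List.foldl_cons, if_neg (by simp [h]), ih, List.filter_cons]
      simp [h]
    · rw [List.foldl_cons, if_pos h, ih, List.filter_cons]
      simp [h]

theorem pv_concatB (punct : List Char) (excl : List (List Char)) (lines : List String) :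
    ∀ (st : List (List Char) × List Char),
      lines.foldl (fun st line => if line = "\n" then st else line.toList.foldl (pvStep punct excl) st) st
        = ((lines.filter (fun l => decide (l ≠ "\n"))).flatMap String.toList).foldl (pvStep punct excl) st := by
  induction lines with
  | nil => intro st; simp
  | cons l rest ih =>
    intro st
    by_cases h : l = "\n"
    · simp [h, ih]
    · simp [h, ih, List.foldl_append]

-- ===== VERDICT (by name: the statement is the Claim_ definition above) =====
theorem file_to_clean_string_spec : Claim_equal_file_to_clean_string := by
  intro f e _
  show _ = file_to_clean_string_alt f e
  unfold file_to_clean_string file_to_clean_string_alt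
  simp only [pv_concatA, pv_concatB, List.nil_append]
  rw [pv_step_eq_step2 pvPunct (e.map String.toList)]
  have h := pv_main (e.map String.toList)
      (PySem.Chars.lower
        ((((f.filter (fun l => decide (l ≠ "\n"))).flatMap String.toList)).filter
          (fun ch => decide (ch ∉ pvPunct)))) [] []
  simp only [List.reverse_nil] at h
  rw [h]
  simp [PySem.Chars.split₀]
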